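-- pv_equiv track=rewrite | github.com/maxtrussell/advent-of-code | 2020/11/main.py | see_occupied
-- ===== SOURCE A (Python) =====
-- def see_occupied(data, r, c, dir_y, dir_x, tiles_looked=1):
--     delta_y = dir_y * tiles_looked
--     delta_x = dir_x * tiles_looked
--     if r+delta_y in range(len(data)) and c+delta_x in range(len(data[r+delta_y])):
--         tile = data[r+delta_y][c+delta_x]
--         if tile == '.':
--             # keep looking
--             return see_occupied(data, r, c, dir_y, dir_x, tiles_looked+1)
--         else:
--             return tile == '#'
--     # out of bounds
--     return False
-- ===== SOURCE B (Python) =====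
-- def see_occupied(data, r, c, dir_y, dir_x, tiles_looked=1):
--     # Walk the ray by maintaining the current position (y, x) incrementally
--     # instead of recomputing dir * step_count at every recursive call.
--     height = len(data)
--     y = r + dir_y * tiles_looked
--     x = c + dir_x * tiles_looked
--     while 0 <= y < height and 0 <= x < len(data[y]):
--         tile = data[y][x]
--         if tile != '.':
--             return tile == '#'
--         y += dir_y
--         x += dir_x
--     return False
-- ===== Notes on version B (the rewrite author's own statement) =====
-- stated objective: alternative
-- what changed: The tail recursion over a growing step counter (multiplying direction by the counter each call) is replaced by an iterative while-loop over an incrementally updated position state (y, x), with the bounds check as the loop condition.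
import Mathlib
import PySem

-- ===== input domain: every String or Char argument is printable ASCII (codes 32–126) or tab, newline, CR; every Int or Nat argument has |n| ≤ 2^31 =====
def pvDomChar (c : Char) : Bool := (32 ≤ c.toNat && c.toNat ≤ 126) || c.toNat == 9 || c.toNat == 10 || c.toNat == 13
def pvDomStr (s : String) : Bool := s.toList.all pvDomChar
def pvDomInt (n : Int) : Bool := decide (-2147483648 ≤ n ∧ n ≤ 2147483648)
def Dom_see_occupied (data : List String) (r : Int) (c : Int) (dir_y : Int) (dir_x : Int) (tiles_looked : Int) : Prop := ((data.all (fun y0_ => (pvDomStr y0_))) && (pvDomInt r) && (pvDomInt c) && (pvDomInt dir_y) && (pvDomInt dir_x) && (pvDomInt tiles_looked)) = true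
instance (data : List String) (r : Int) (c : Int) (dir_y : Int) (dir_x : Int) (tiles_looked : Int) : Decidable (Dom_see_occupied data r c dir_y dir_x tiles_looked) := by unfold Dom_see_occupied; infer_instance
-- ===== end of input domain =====

-- B replaces A's tail recursion over a step counter (direction multiplied by the
-- counter each call) by a while-loop over an incrementally updated position (y, x);
-- a different decomposition of the same cost (alternative, not faster).

-- ===== PORT A =====
-- literal transliteration of A's recursion; the Nat fuel (never exhausted on inputs
-- satisfying Pre_) only makes the recursion structural
def see_occupiedFuel (data : List String) (r : Int) (c : Int) (dir_y : Int) (dir_x : Int) :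
    Int → Nat → Bool
  | _, 0 => false
  | tiles_looked, fuel + 1 =>
    if 0 ≤ r + dir_y * tiles_looked ∧ r + dir_y * tiles_looked < (data.length : Int) then
      if 0 ≤ c + dir_x * tiles_looked ∧
          c + dir_x * tiles_looked <
            (((data.getD (r + dir_y * tiles_looked).toNat "").toList.length : Int)) then
        if (data.getD (r + dir_y * tiles_looked).toNat "").toList.getD
            (c + dir_x * tiles_looked).toNat ' ' = '.' then
          see_occupiedFuel data r c dir_y dir_x (tiles_looked + 1) fuel
        else
          decide ((data.getD (r + dir_y * tiles_looked).toNat "").toList.getD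
            (c + dir_x * tiles_looked).toNat ' ' = '#')
      else false
    else false

def see_occupied (data : List String) (r : Int) (c : Int) (dir_y : Int) (dir_x : Int) (tiles_looked : Int) : Bool :=
  see_occupiedFuel data r c dir_y dir_x tiles_looked
    (data.length + (data.map (fun s => s.toList.length)).foldr max 0 + 2)

-- ===== PORT B =====
-- the grid as rows of characters (Python's data[y][x] reads on a string)
def pvRows (data : List String) : List (List Char) := data.map String.toList

-- B's while-loop: state is the current position (y, x); fuel (never exhausted on
-- inputs satisfying Pre_) only makes the loop a structural recursion
def pvWalk (rows : List (List Char)) (dir_y : Int) (dir_x : Int) : Int → Int → Nat → Bool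
  | _, _, 0 => false
  | y, x, fuel + 1 =>
    if 0 ≤ y ∧ y < (rows.length : Int) ∧ 0 ≤ x ∧ x < ((rows.getD y.toNat []).length : Int) then
      if (rows.getD y.toNat []).getD x.toNat ' ' ≠ '.' then
        (rows.getD y.toNat []).getD x.toNat ' ' == '#'
      else pvWalk rows dir_y dir_x (y + dir_y) (x + dir_x) fuel
    else false

def see_occupied_alt (data : List String) (r : Int) (c : Int) (dir_y : Int) (dir_x : Int) (tiles_looked : Int) : Bool :=
  pvWalk (pvRows data) dir_y dir_x (r + dir_y * tiles_looked) (c + dir_x * tiles_looked)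
    ((pvRows data).length + (pvRows data).foldr (fun row m => max row.length m) 0 + 2)

-- ===== PRECONDITION & SPEC =====
-- Pre_ excludes exactly the inputs on which Python A recurses forever (RecursionError):
-- zero direction with the fixed in-bounds cell holding the floor tile '.'.
def Pre_see_occupied (data : List String) (r : Int) (c : Int) (dir_y : Int) (dir_x : Int) (tiles_looked : Int) : Prop :=
  ¬ (dir_y = 0 ∧ dir_x = 0 ∧ 0 ≤ r ∧ r < (data.length : Int) ∧
      0 ≤ c ∧ c < ((data.getD r.toNat "").toList.length : Int) ∧
      (data.getD r.toNat "").toList.getD c.toNat ' ' = '.')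
instance (data : List String) (r : Int) (c : Int) (dir_y : Int) (dir_x : Int) (tiles_looked : Int) : Decidable (Pre_see_occupied data r c dir_y dir_x tiles_looked) := by unfold Pre_see_occupied; infer_instance

def pvWitness_see_occupied : List String × Int × Int × Int × Int × Int := (["#.", ".L"], 0, 0, 0, 1, 1)

def Spec_see_occupied (data : List String) (r : Int) (c : Int) (dir_y : Int) (dir_x : Int) (tiles_looked : Int) (out : Bool) : Prop := out = see_occupied_alt data r c dir_y dir_x tiles_looked
instance (data : List String) (r : Int) (c : Int) (dir_y : Int) (dir_x : Int) (tiles_looked : Int) (out : Bool) : Decidable (Spec_see_occupied data r c dir_y dir_x tiles_looked out) := by unfold Spec_see_occupied; infer_instance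

-- ===== CLAIM (what is proved, stated in full; the proofs are below) =====
def Claim_equal_see_occupied : Prop := ∀ (data : List String) (r : Int) (c : Int) (dir_y : Int) (dir_x : Int) (tiles_looked : Int), Dom_see_occupied data r c dir_y dir_x tiles_looked → Pre_see_occupied data r c dir_y dir_x tiles_looked → Spec_see_occupied data r c dir_y dir_x tiles_looked (see_occupied data r c dir_y dir_x tiles_looked)

-- ===== LEMMAS AND PROOFS =====

-- decide on Char equality is Char's boolean equality
lemma pvDecideBeq (a b : Char) : decide (a = b) = (a == b) := by
  by_cases h : a = b <;> simp [h]

-- reading a row of pvRows is reading the string and converting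
lemma pvRows_getD (data : List String) (i : Nat) :
    (pvRows data).getD i [] = (data.getD i "").toList := by
  simp [pvRows, List.getD, List.getElem?_map]
  cases data[i]? <;> rfl

lemma pvRows_length (data : List String) : (pvRows data).length = data.length := by
  simp [pvRows]

-- the two fuel bounds coincide
lemma pvFuel_eq (data : List String) :
    (pvRows data).length + (pvRows data).foldr (fun row m => max row.length m) 0 + 2 =
      data.length + (data.map (fun s => s.toList.length)).foldr max 0 + 2 := by
  simp [pvRows, List.foldr_map]

-- A's recursion at step counter t computes B's walk from position (r+dy*t, c+dx*t)
lemma pvStep_eq_walk (data : List String) (r c dir_y dir_x : Int) :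
    ∀ (n : Nat) (t : Int),
      see_occupiedFuel data r c dir_y dir_x t n =
        pvWalk (pvRows data) dir_y dir_x (r + dir_y * t) (c + dir_x * t) n := by
  intro n
  induction n with
  | zero => intro t; rfl
  | succ n ih =>
    intro t
    rw [see_occupiedFuel, pvWalk]
    simp only [pvRows_getD, pvRows_length]
    by_cases hy : 0 ≤ r + dir_y * t ∧ r + dir_y * t < (data.length : Int)
    · by_cases hx : 0 ≤ c + dir_x * t ∧
          c + dir_x * t < (((data.getD (r + dir_y * t).toNat "").toList.length : Int))
      · have hB : 0 ≤ r + dir_y * t ∧ r + dir_y * t < (data.length : Int) ∧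
            0 ≤ c + dir_x * t ∧
            c + dir_x * t < (((data.getD (r + dir_y * t).toNat "").toList.length : Int)) :=
          ⟨hy.1, hy.2, hx.1, hx.2⟩
        rw [if_pos hy, if_pos hx, if_pos hB]
        by_cases htile :
            (data.getD (r + dir_y * t).toNat "").toList.getD (c + dir_x * t).toNat ' ' = '.'
        · have h1 : r + dir_y * t + dir_y = r + dir_y * (t + 1) := by ring
          have h2 : c + dir_x * t + dir_x = c + dir_x * (t + 1) := by ring
          simp only [htile, ne_eq, not_true_eq_false, if_false, h1, h2]
          exact ih (t + 1)
        · simp only [ne_eq, htile, not_false_eq_true, if_true]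
          exact pvDecideBeq _ _
      · rw [if_pos hy, if_neg hx, if_neg (fun h => hx ⟨h.2.2.1, h.2.2.2⟩)]
    · rw [if_neg hy, if_neg (fun h => hy ⟨h.1, h.2.1⟩)]

-- ===== VERDICT (by name: the statement is the Claim_ definition above) =====
theorem see_occupied_spec : Claim_equal_see_occupied := by
  intro data r c dir_y dir_x tiles_looked _ _
  unfold Spec_see_occupied see_occupied see_occupied_alt
  rw [pvFuel_eq]
  exact pvStep_eq_walk data r c dir_y dir_x _ tiles_looked
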